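-- pv_equiv track=rewrite | github.com/soyukke/lean-unsolved | scripts/collatz_syracuse_inverse_layers.py | compute_indegree
-- ===== SOURCE A (Python) =====
-- def compute_indegree(n):
--     """奇数nのSyracuse逆像の数（入次数）"""
--     # n ≡ 0 (mod 3): 入次数0（前像なし）... だがnは奇数なのでn≡0(mod3)は可能
--     # 実際には: 入次数の条件は n mod 3 と n mod 2 に依存
--     # 奇数nの前像: m = (n*2^a - 1)/3 が奇数になるaの数
--     count = 0
--     for a in range(1, 100):
--         val = n * (1 << a) - 1
--         if val % 3 == 0:
--             m = val // 3
--             if m > 0 and m % 2 == 1: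
--                 count += 1
--     return count
-- ===== SOURCE B (Python) =====
-- def compute_indegree(n):
--     """奇数nのSyracuse逆像の数（入次数）"""
--     # Closed form: val = n*2^a - 1 is always odd, so m = val//3 is odd whenever
--     # it is an integer; m > 0 only for n > 0; divisibility by 3 holds for
--     # even a when n % 3 == 1 (49 such a in 1..99) and odd a when n % 3 == 2 (50).
--     if n <= 0 or n % 3 == 0:
--         return 0
--     return 49 if n % 3 == 1 else 50
-- ===== Notes on version B (the rewrite author's own statement) =====
-- stated objective: simpler
-- what changed: Replaces the 99-iteration search loop over exponents with a constant-time closed form depending only on the sign of n and its residue mod 3.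
import Mathlib
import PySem

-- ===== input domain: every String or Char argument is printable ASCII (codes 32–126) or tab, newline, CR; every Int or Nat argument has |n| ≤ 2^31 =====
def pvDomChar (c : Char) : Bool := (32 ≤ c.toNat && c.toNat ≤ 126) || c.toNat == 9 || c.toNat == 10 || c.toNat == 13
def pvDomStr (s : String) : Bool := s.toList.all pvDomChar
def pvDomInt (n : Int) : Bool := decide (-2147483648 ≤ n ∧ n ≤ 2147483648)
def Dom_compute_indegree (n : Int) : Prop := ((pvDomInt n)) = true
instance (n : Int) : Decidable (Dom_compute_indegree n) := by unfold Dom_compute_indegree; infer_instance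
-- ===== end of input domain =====

-- B replaces A's 99-iteration search loop by a constant-time closed form on sign(n) and n % 3 (simpler).


-- ===== PORT A =====
def pvBodyA (n count a : Int) : Int :=
  let val := n * ((1 : Int) <<< a.toNat) - 1   -- 1 << a (a is in 1..99, nonnegative)
  if PySem.Int.mod val 3 = 0 then
    let m := PySem.Int.floordiv val 3
    if 0 < m ∧ PySem.Int.mod m 2 = 1 then count + 1 else count
  else count

def compute_indegree (n : Int) : Int :=
  (PySem.List.pyRange 1 100 1).foldl (pvBodyA n) 0

-- ===== PORT B =====
def compute_indegree_alt (n : Int) : Int :=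
  if n ≤ 0 ∨ PySem.Int.mod n 3 = 0 then 0
  else if PySem.Int.mod n 3 = 1 then 49 else 50

-- ===== PRECONDITION & SPEC =====
def Spec_compute_indegree (n : Int) (out : Int) : Prop := out = compute_indegree_alt n
instance (n : Int) (out : Int) : Decidable (Spec_compute_indegree n out) := by unfold Spec_compute_indegree; infer_instance

-- ===== CLAIM (what is proved, stated in full; the proofs are below) =====
def Claim_equal_compute_indegree : Prop := ∀ (n : Int), Dom_compute_indegree n → Spec_compute_indegree n (compute_indegree n)

-- ===== LEMMAS AND PROOFS =====

-- the Boolean predicate A's loop body tests (counts a iff this holds)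
def pA (n a : Int) : Bool :=
  decide (PySem.Int.mod (n * ((1 : Int) <<< a.toNat) - 1) 3 = 0 ∧
    0 < PySem.Int.floordiv (n * ((1 : Int) <<< a.toNat) - 1) 3 ∧
    PySem.Int.mod (PySem.Int.floordiv (n * ((1 : Int) <<< a.toNat) - 1) 3) 2 = 1)

-- the closed-form predicate
def qA (n a : Int) : Bool :=
  decide (0 < n ∧ ((n % 3 = 1 ∧ a % 2 = 0) ∨ (n % 3 = 2 ∧ a % 2 = 1)))

theorem two_pow_mod_three (k : Nat) : (2 : Int) ^ k % 3 = if k % 2 = 0 then 1 else 2 := by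
  induction k with
  | zero => decide
  | succ m ih =>
    have h : (2 : Int) ^ (m + 1) = 2 ^ m * 2 := by ring
    rw [h, Int.mul_emod, ih]
    rcases Nat.even_or_odd m with hm | hm
    · have h0 : m % 2 = 0 := Nat.even_iff.mp hm
      have h1 : (m + 1) % 2 = 1 := by omega
      simp [h0, h1]
    · have h0 : m % 2 = 1 := Nat.odd_iff.mp hm
      have h1 : (m + 1) % 2 = 0 := by omega
      simp [h0, h1]

theorem pA_eq_qA (n a : Int) (ha : 1 ≤ a) : pA n a = qA n a := by
  unfold pA qA
  have hk : ((a.toNat : Int)) = a := Int.toNat_of_nonneg (by omega)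
  have hk1 : 1 ≤ a.toNat := by omega
  have hsh : (1 : Int) <<< a.toNat = 2 ^ a.toNat := by simp [Int.shiftLeft_eq]
  have hx2 : (2 : Int) ≤ 2 ^ a.toNat := by
    calc (2 : Int) = 2 ^ 1 := by ring
    _ ≤ 2 ^ a.toNat := pow_le_pow_right₀ (by norm_num) hk1
  have hx3 : (2 : Int) ^ a.toNat % 3 = if a.toNat % 2 = 0 then 1 else 2 := two_pow_mod_three a.toNat
  have hx2' : (2 : Int) ^ a.toNat % 2 = 0 := by
    have : (2 : Int) ∣ 2 ^ a.toNat := dvd_pow_self 2 (by omega)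
    exact Int.emod_eq_zero_of_dvd this
  have hy3 : (n * 2 ^ a.toNat) % 3 = (n % 3 * ((2:Int) ^ a.toNat % 3)) % 3 := Int.mul_emod _ _ _
  have hy2 : (n * 2 ^ a.toNat) % 2 = (n % 2 * ((2:Int) ^ a.toNat % 2)) % 2 := Int.mul_emod _ _ _
  have hpos : 0 < n → 2 ≤ n * 2 ^ a.toNat := by
    intro hn
    calc (2 : Int) ≤ 2 ^ a.toNat := hx2
    _ ≤ n * 2 ^ a.toNat := le_mul_of_one_le_left (by omega) (by omega)
  have hneg : n ≤ 0 → n * 2 ^ a.toNat ≤ 0 :=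
    fun hn => mul_nonpos_of_nonpos_of_nonneg hn (by positivity)
  rw [hsh]
  simp only [PySem.Int.mod_eq_emod_of_pos (show (0:Int) < 3 by norm_num),
    PySem.Int.mod_eq_emod_of_pos (show (0:Int) < 2 by norm_num),
    PySem.Int.floordiv_eq_ediv_of_pos (show (0:Int) < 3 by norm_num)]
  simp only [decide_eq_decide]
  rw [hx3] at hy3
  rw [hx2'] at hy2
  simp only [mul_zero, Int.zero_emod] at hy2
  generalize hy : n * (2:Int) ^ a.toNat = y at hy3 hy2 hpos hneg
  clear hx3 hx2' hx2 hsh hy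
  rcases Nat.even_or_odd a.toNat with hm | hm
  · have h0 : a.toNat % 2 = 0 := Nat.even_iff.mp hm
    rw [if_pos h0, mul_one] at hy3
    omega
  · have h0 : a.toNat % 2 = 1 := Nat.odd_iff.mp hm
    rw [if_neg (by omega)] at hy3
    omega

theorem body_as_count (n : Int) :
    compute_indegree n = ((PySem.List.pyRange 1 100 1).countP (pA n) : Int) := by
  unfold compute_indegree
  have hbody : pvBodyA n = (fun (count : Int) (a : Int) => if pA n a then count + 1 else count) := by
    funext count a
    simp only [pvBodyA, pA, decide_eq_true_eq]
    split_ifs with h1 h2 h3 h3 <;> first | rfl | (exfalso; tauto)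
  rw [hbody, PySem.List.foldl_count_if]
  simp

theorem count_evens : (PySem.List.pyRange 1 100 1).countP (fun a => decide (a % 2 = 0)) = 49 := by
  decide

theorem count_odds : (PySem.List.pyRange 1 100 1).countP (fun a => decide (a % 2 = 1)) = 50 := by
  decide

-- ===== VERDICT (by name: the statement is the Claim_ definition above) =====
theorem compute_indegree_spec : Claim_equal_compute_indegree := by
  intro n _
  unfold Spec_compute_indegree compute_indegree_alt
  rw [body_as_count n]
  have hcong : (PySem.List.pyRange 1 100 1).countP (pA n)
      = (PySem.List.pyRange 1 100 1).countP (qA n) := by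
    apply List.countP_congr
    intro a hmem
    have ha : 1 ≤ a := (PySem.List.mem_pyRange_one.mp hmem).1
    rw [pA_eq_qA n a ha]
  rw [hcong]
  rw [PySem.Int.mod_eq_emod_of_pos (show (0:Int) < 3 by norm_num)]
  by_cases hn : n ≤ 0 ∨ n % 3 = 0
  · rw [if_pos hn]
    have : (PySem.List.pyRange 1 100 1).countP (qA n) = 0 := by
      apply List.countP_eq_zero.mpr
      intro a _
      simp only [qA, decide_eq_true_eq]
      rintro ⟨h1, h2 | h2⟩ <;> omega
    simp [this]
  · rw [if_neg hn]
    push Not at hn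
    obtain ⟨hn0, hn3⟩ := hn
    by_cases h1 : n % 3 = 1
    · rw [if_pos h1]
      have : qA n = fun a => decide (a % 2 = 0) := by
        funext a
        simp only [qA, decide_eq_decide]
        constructor
        · rintro ⟨_, h | h⟩ <;> omega
        · intro h; exact ⟨by omega, Or.inl ⟨h1, h⟩⟩
      rw [this, count_evens]; rfl
    · rw [if_neg h1]
      have h2 : n % 3 = 2 := by omega
      have : qA n = fun a => decide (a % 2 = 1) := by
        funext a
        simp only [qA, decide_eq_decide]
        constructor
        · rintro ⟨_, h | h⟩ <;> omega
        · intro h; exact ⟨by omega, Or.inr ⟨h2, h⟩⟩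
      rw [this, count_odds]; rfl
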